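-- pv_equiv track=rewrite | github.com/MarioBrnal10/API | API-PDFS/extractor_filtro_2 copy.py | find_available_inventory_by_index
-- ===== SOURCE A (Python) =====
-- def find_available_inventory_by_index(todos_inventarios, inventarios_asignados, index):
--     """Encuentra inventario disponible por índice"""
--     inventarios_ordenados = sorted(list(todos_inventarios))
--
--     for offset in range(len(inventarios_ordenados)):
--         for direction in [0, 1, -1]:
--             idx_busqueda = index + (offset * direction)
--
--             if 0 <= idx_busqueda < len(inventarios_ordenados):
--                 inventario_candidato = inventarios_ordenados[idx_busqueda]
--                 if inventario_candidato not in inventarios_asignados: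
--                     return inventario_candidato
--
--     return None
-- ===== SOURCE B (Python) =====
-- def find_available_inventory_by_index(todos_inventarios, inventarios_asignados, index):
--     """Encuentra inventario disponible por índice"""
--     inv = sorted(todos_inventarios)
--     n = len(inv)
--
--     def check(pos):
--         if 0 <= pos < n and inv[pos] not in inventarios_asignados:
--             return inv[pos]
--         return None
--
--     right = None  # (offset, value) of first hit scanning rightwards from index
--     for o in range(n):
--         v = check(index + o)
--         if v is not None:
--             right = (o, v)
--             break
--
--     left = None  # (offset, value) of first hit scanning leftwards from index
--     for o in range(1, n):
--         v = check(index - o)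
--         if v is not None:
--             left = (o, v)
--             break
--
--     if right is not None and left is not None:
--         return right[1] if right[0] <= left[0] else left[1]
--     if right is not None:
--         return right[1]
--     if left is not None:
--         return left[1]
--     return None
-- ===== Notes on version B (the rewrite author's own statement) =====
-- stated objective: alternative
-- what changed: Replaces A's nested offset-by-direction loop (which re-tests the start index every iteration) by two independent directional scans recording the first available (offset, value) to the right and to the left, then a single offset comparison with rightward preference on ties.
import Mathlib
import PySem

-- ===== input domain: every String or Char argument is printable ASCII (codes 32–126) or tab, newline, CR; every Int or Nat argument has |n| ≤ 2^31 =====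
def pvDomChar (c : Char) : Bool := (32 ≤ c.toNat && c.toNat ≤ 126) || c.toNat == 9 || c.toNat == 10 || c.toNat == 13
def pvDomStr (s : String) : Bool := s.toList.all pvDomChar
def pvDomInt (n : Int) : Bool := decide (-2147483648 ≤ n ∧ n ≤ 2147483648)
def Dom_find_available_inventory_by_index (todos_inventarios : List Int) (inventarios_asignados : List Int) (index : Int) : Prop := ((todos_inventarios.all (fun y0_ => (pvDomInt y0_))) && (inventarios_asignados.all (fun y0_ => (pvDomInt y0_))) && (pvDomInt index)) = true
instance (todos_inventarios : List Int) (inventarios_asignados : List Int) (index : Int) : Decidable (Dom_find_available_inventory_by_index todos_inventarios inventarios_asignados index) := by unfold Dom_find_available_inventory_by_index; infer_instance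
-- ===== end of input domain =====

-- B replaces A's nested offset×direction search by two independent directional first-hit scans
-- combined by one offset comparison (rightward wins ties); objective: alternative decomposition.

-- ===== PORT A =====
def find_available_inventory_by_index (todos_inventarios : List Int) (inventarios_asignados : List Int) (index : Int) : Option Int :=
  let inventarios_ordenados := PySem.List.sorted todos_inventarios (fun x => x) false
  (PySem.List.pyRange 0 (inventarios_ordenados.length : Int) 1).foldl
    (fun acc offset =>
      ([0, 1, -1] : List Int).foldl
        (fun acc2 direction =>
          match acc2 with
          | some v => some v
          | none =>
            if 0 ≤ index + offset * direction ∧ index + offset * direction < (inventarios_ordenados.length : Int) then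
              match PySem.List.pyGet? inventarios_ordenados (index + offset * direction) with
              | some c => if inventarios_asignados.contains c then none else some c
              | none => none
            else none)
        acc)
    none

-- ===== PORT B =====
-- Source B's local helper `check(pos)`
def pvCheck (inv : List Int) (asignados : List Int) (pos : Int) : Option Int :=
  if 0 ≤ pos ∧ pos < (inv.length : Int) then
    match PySem.List.pyGet? inv pos with
    | some c => if asignados.contains c then none else some c
    | none => none
  else none

def find_available_inventory_by_index_alt (todos_inventarios : List Int) (inventarios_asignados : List Int) (index : Int) : Option Int :=
  let inv := PySem.List.sorted todos_inventarios (fun x => x) false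
  let n : Int := (inv.length : Int)
  let right := (PySem.List.pyRange 0 n 1).foldl
    (fun acc o =>
      match acc with
      | some p => some p
      | none =>
        match pvCheck inv inventarios_asignados (index + o) with
        | some v => some (o, v)
        | none => none) none
  let left := (PySem.List.pyRange 1 n 1).foldl
    (fun acc o =>
      match acc with
      | some p => some p
      | none =>
        match pvCheck inv inventarios_asignados (index - o) with
        | some v => some (o, v)
        | none => none) none
  match right, left with
  | some r, some l => if r.1 ≤ l.1 then some r.2 else some l.2
  | some r, none => some r.2
  | none, some l => some l.2
  | none, none => none

-- ===== PRECONDITION & SPEC =====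
def Spec_find_available_inventory_by_index (todos_inventarios : List Int) (inventarios_asignados : List Int) (index : Int) (out : Option Int) : Prop := out = find_available_inventory_by_index_alt todos_inventarios inventarios_asignados index
instance (todos_inventarios : List Int) (inventarios_asignados : List Int) (index : Int) (out : Option Int) : Decidable (Spec_find_available_inventory_by_index todos_inventarios inventarios_asignados index out) := by unfold Spec_find_available_inventory_by_index; infer_instance

-- ===== CLAIM (what is proved, stated in full; the proofs are below) =====
def Claim_equal_find_available_inventory_by_index : Prop := ∀ (todos_inventarios : List Int) (inventarios_asignados : List Int) (index : Int), Dom_find_available_inventory_by_index todos_inventarios inventarios_asignados index → Spec_find_available_inventory_by_index todos_inventarios inventarios_asignados index (find_available_inventory_by_index todos_inventarios inventarios_asignados index)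

-- ===== LEMMAS AND PROOFS =====

/-- First-result choice: Python's `x if x is not None else y` / return-on-first-hit. -/
def pvOb (x y : Option Int) : Option Int :=
  match x with
  | some v => some v
  | none => y

/-- Source B's final if-chain on the two scan results. -/
def pvCombine (r l : Option (Int × Int)) : Option Int :=
  match r, l with
  | some r, some l => if r.1 ≤ l.1 then some r.2 else some l.2
  | some r, none => some r.2
  | none, some l => some l.2
  | none, none => none

theorem pvFoldlStop {α β : Type} (f : Option β → α → Option β)
    (h1 : ∀ v x, f (some v) x = some v) (l : List α) (v : β) :
    l.foldl f (some v) = some v := by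
  induction l with
  | nil => rfl
  | cons x l ih => simpa [List.foldl_cons, h1] using ih

theorem pvFoldlFindSome {α β : Type} (f : Option β → α → Option β) (g : α → Option β)
    (h1 : ∀ v x, f (some v) x = some v) (h2 : ∀ x, f none x = g x) (l : List α) :
    l.foldl f none = l.findSome? g := by
  induction l with
  | nil => rfl
  | cons x l ih =>
    rw [List.foldl_cons, h2, List.findSome?_cons]
    cases h : g x with
    | some v => simp [pvFoldlStop f h1]
    | none => simpa using ih

theorem pvFindSomePairMem {α β : Type} (f : α → Option β) (l : List α) (p : α × β)
    (h : l.findSome? (fun o => (f o).map (fun v => (o, v))) = some p) :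
    p.1 ∈ l ∧ f p.1 = some p.2 := by
  induction l with
  | nil => simp at h
  | cons x l ih =>
    rw [List.findSome?_cons] at h
    cases hx : (f x).map (fun v => (x, v)) with
    | some q =>
      rw [hx] at h
      cases hf : f x with
      | some v =>
        rw [hf] at hx
        simp at hx
        injection h with h
        subst h; subst hx
        exact ⟨List.mem_cons_self, hf⟩
      | none => rw [hf] at hx; simp at hx
    | none =>
      rw [hx] at h
      obtain ⟨hm, he⟩ := ih h
      exact ⟨List.mem_cons_of_mem _ hm, he⟩

theorem pvCombineFindSome (r l : Int → Option Int) (L : List Int) (hL : L.Pairwise (· < ·)) :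
    pvCombine (L.findSome? (fun o => (r o).map (fun v => (o, v))))
              (L.findSome? (fun o => (l o).map (fun v => (o, v))))
    = L.findSome? (fun o => pvOb (r o) (l o)) := by
  induction L with
  | nil => rfl
  | cons x L ih =>
    have hx : ∀ y ∈ L, x < y := (List.pairwise_cons.mp hL).1
    have hP : L.Pairwise (· < ·) := List.Pairwise.of_cons hL
    rw [List.findSome?_cons, List.findSome?_cons, List.findSome?_cons]
    cases hr : r x with
    | some v =>
      cases hl : l x with
      | some w => simp [pvCombine, pvOb, hr, hl]
      | none =>
        simp only [hr, hl, Option.map_some, Option.map_none]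
        cases hLf : L.findSome? (fun o => (l o).map (fun v => (o, v))) with
        | none => simp [pvCombine, pvOb, hLf]
        | some q =>
          obtain ⟨hm, _⟩ := pvFindSomePairMem l L q hLf
          have : x ≤ q.1 := le_of_lt (hx _ hm)
          simp [pvCombine, pvOb, hLf, this]
    | none =>
      cases hl : l x with
      | some w =>
        simp only [hr, hl, Option.map_some, Option.map_none]
        cases hRf : L.findSome? (fun o => (r o).map (fun v => (o, v))) with
        | none => simp [pvCombine, pvOb, hRf]
        | some q =>
          obtain ⟨hm, _⟩ := pvFindSomePairMem r L q hRf
          have : ¬ q.1 ≤ x := not_le_of_gt (hx _ hm)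
          simp [pvCombine, pvOb, hRf, this]
      | none =>
        simp only [hr, hl, Option.map_none]
        exact ih hP

theorem pvA_char (t a : List Int) (i : Int) :
    find_available_inventory_by_index t a i
    = (PySem.List.pyRange 0 ((PySem.List.sorted t (fun x => x) false).length : Int) 1).findSome?
        (fun o => pvOb (pvCheck (PySem.List.sorted t (fun x => x) false) a (i + o))
                       (pvCheck (PySem.List.sorted t (fun x => x) false) a (i - o))) := by
  simp only [find_available_inventory_by_index]
  set inv := PySem.List.sorted t (fun x => x) false with hinv
  have step : ∀ o : Int,
      (([0, 1, -1] : List Int).foldl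
        (fun acc2 direction =>
          match acc2 with
          | some v => some v
          | none =>
            if 0 ≤ i + o * direction ∧ i + o * direction < (inv.length : Int) then
              match PySem.List.pyGet? inv (i + o * direction) with
              | some c => if a.contains c then none else some c
              | none => none
            else none)
        none)
      = pvOb (pvCheck inv a i) (pvOb (pvCheck inv a (i + o)) (pvCheck inv a (i - o))) := by
    intro o
    have e0 : i + o * 0 = i := by ring
    have e1 : i + o * 1 = i + o := by ring
    have e2 : i + o * (-1) = i - o := by ring
    simp only [List.foldl_cons, List.foldl_nil, e0, e1, e2]
    change pvOb (pvOb (pvCheck inv a i) (pvCheck inv a (i + o))) (pvCheck inv a (i - o)) = _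
    cases h0 : pvCheck inv a i <;> cases h1 : pvCheck inv a (i + o) <;> simp [pvOb]
  rw [pvFoldlFindSome _
      (fun o => pvOb (pvCheck inv a i) (pvOb (pvCheck inv a (i + o)) (pvCheck inv a (i - o))))
      (fun v x => pvFoldlStop _ (fun w d => rfl) _ v) step]
  cases h : pvCheck inv a i with
  | none => simp only [h, pvOb]
  | some v =>
    rcases Nat.eq_zero_or_pos inv.length with hn | hn
    · rw [PySem.List.pyRange_one_eq_nil (by omega), List.findSome?_nil, List.findSome?_nil]
    · rw [PySem.List.pyRange_one_cons (by exact_mod_cast hn), List.findSome?_cons, List.findSome?_cons]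
      simp [pvOb, h, add_zero]

theorem pvB_char (t a : List Int) (i : Int) :
    find_available_inventory_by_index_alt t a i
    = pvCombine
        ((PySem.List.pyRange 0 ((PySem.List.sorted t (fun x => x) false).length : Int) 1).findSome?
          (fun o => (pvCheck (PySem.List.sorted t (fun x => x) false) a (i + o)).map (fun v => (o, v))))
        ((PySem.List.pyRange 1 ((PySem.List.sorted t (fun x => x) false).length : Int) 1).findSome?
          (fun o => (pvCheck (PySem.List.sorted t (fun x => x) false) a (i - o)).map (fun v => (o, v)))) := by
  simp only [find_available_inventory_by_index_alt]
  set inv := PySem.List.sorted t (fun x => x) false with hinv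
  rw [pvFoldlFindSome _ (fun o => (pvCheck inv a (i + o)).map (fun v => (o, v)))
        (fun v x => rfl) (fun o => by cases h : pvCheck inv a (i + o) <;> simp [h]),
      pvFoldlFindSome _ (fun o => (pvCheck inv a (i - o)).map (fun v => (o, v)))
        (fun v x => rfl) (fun o => by cases h : pvCheck inv a (i - o) <;> simp [h])]
  rfl

-- ===== VERDICT (by name: the statement is the Claim_ definition above) =====
theorem find_available_inventory_by_index_spec : Claim_equal_find_available_inventory_by_index := by
  intro t a i _
  unfold Spec_find_available_inventory_by_index
  rw [pvA_char, pvB_char]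
  set inv := PySem.List.sorted t (fun x => x) false with hinv
  rw [← pvCombineFindSome (fun o => pvCheck inv a (i + o)) (fun o => pvCheck inv a (i - o))
        (PySem.List.pyRange 0 (inv.length : Int) 1) (PySem.List.pairwise_lt_pyRange_one 0 (inv.length : Int))]
  rcases Nat.eq_zero_or_pos inv.length with hn | hn
  · rw [PySem.List.pyRange_one_eq_nil (by omega), PySem.List.pyRange_one_eq_nil (by omega)]
  · rw [PySem.List.pyRange_one_cons (a := 0) (by exact_mod_cast hn), List.findSome?_cons,
        List.findSome?_cons, zero_add, add_zero, sub_zero]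
    cases h : pvCheck inv a i with
    | none => simp only [h, Option.map_none]
    | some v =>
      simp only [h, Option.map_some]
      cases hL : (PySem.List.pyRange 1 (inv.length : Int) 1).findSome?
          (fun o => (pvCheck inv a (i - o)).map (fun v => (o, v))) with
      | none => rfl
      | some q =>
        obtain ⟨hm, _⟩ := pvFindSomePairMem (fun o => pvCheck inv a (i - o)) _ q hL
        have hq : (1:Int) ≤ q.1 := (PySem.List.mem_pyRange_one.mp hm).1
        simp [pvCombine, (by omega : (0:Int) ≤ q.1)]
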